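-- pv_equiv track=rewrite | github.com/steverydz/adventofcode2024 | day-02/part-2/main.py | get_safe_reports
-- ===== SOURCE A (Python) =====
-- def is_increasing(report):
--     levels = []
--
--     for level in report:
--         if levels and level <= levels[-1]:
--             return False
--
--         levels.append(level)
--
--     return True
--
-- def is_safe_increasing(report):
--     if not is_increasing(report):
--         return False
--
--     levels = []
--
--     for level in report:
--         if levels:
--             prev = levels[-1]
--
--             if level - prev < 1:
--                 return False
--
--             if level - prev > 3:
--                 return False
--
--         levels.append(level)
--
--     return True
--
-- def is_decreasing(report):
--     levels = []
--
--     for level in report: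
--         if levels and level >= levels[-1]:
--             return False
--
--         levels.append(level)
--
--     return True
--
-- def is_safe_decreasing(report):
--     if not is_decreasing(report):
--         return False
--
--     levels = []
--
--     for level in report:
--         if levels:
--             prev = levels[-1]
--
--             if prev - level < 1:
--                 return False
--
--             if prev - level > 3:
--                 return False
--
--         levels.append(level)
--
--     return True
--
-- def safe_increasing_dampened_reports(report):
--     for i in range(len(report)):
--         if is_safe_increasing(report[:i] + report[i + 1 :]):
--             return True
--
--     return False
--
-- def safe_decreasing_dampened_reports(report):
--     for i in range(len(report)):
--         if is_safe_decreasing(report[:i] + report[i + 1 :]):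
--             return True
--
--     return False
--
-- def get_safe_reports(reports):
--     safe_increasing_reports = []
--     safe_decreasing_reports = []
--
--     for report in reports:
--         if is_safe_increasing(report):
--             safe_increasing_reports.append(report)
--         elif safe_increasing_dampened_reports(report):
--             safe_increasing_reports.append(report)
--
--         if is_safe_decreasing(report):
--             safe_decreasing_reports.append(report)
--         elif safe_decreasing_dampened_reports(report):
--             safe_decreasing_reports.append(report)
--
--     return safe_increasing_reports + safe_decreasing_reports
-- ===== SOURCE B (Python) =====
-- def get_safe_reports(reports):
--     def damp_safe(r, ok):
--         # find the first adjacent pair violating ok; only deleting one of its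
--         # two endpoints can possibly repair the report
--         k = None
--         for i in range(len(r) - 1):
--             if not ok(r[i], r[i + 1]):
--                 k = i
--                 break
--         if k is None:
--             return True
--
--         def safe(seq):
--             return all(ok(a, b) for a, b in zip(seq, seq[1:]))
--
--         return safe(r[:k] + r[k + 1:]) or safe(r[:k + 1] + r[k + 2:])
--
--     def inc(a, b):
--         return 1 <= b - a <= 3
--
--     def dec(a, b):
--         return 1 <= a - b <= 3
--
--     return [r for r in reports if damp_safe(r, inc)] + \
--            [r for r in reports if damp_safe(r, dec)]
-- ===== Notes on version B (the rewrite author's own statement) =====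
-- stated objective: faster
-- what changed: Instead of A's dampener that re-checks the report once per candidate deletion (and A's separate strict-monotonicity plus difference-bound scans), B finds the first adjacent pair violating the 1..3 step rule in one pass and tests only the two deletions at that pair, since deleting any other index leaves the violating pair adjacent.
import Mathlib
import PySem

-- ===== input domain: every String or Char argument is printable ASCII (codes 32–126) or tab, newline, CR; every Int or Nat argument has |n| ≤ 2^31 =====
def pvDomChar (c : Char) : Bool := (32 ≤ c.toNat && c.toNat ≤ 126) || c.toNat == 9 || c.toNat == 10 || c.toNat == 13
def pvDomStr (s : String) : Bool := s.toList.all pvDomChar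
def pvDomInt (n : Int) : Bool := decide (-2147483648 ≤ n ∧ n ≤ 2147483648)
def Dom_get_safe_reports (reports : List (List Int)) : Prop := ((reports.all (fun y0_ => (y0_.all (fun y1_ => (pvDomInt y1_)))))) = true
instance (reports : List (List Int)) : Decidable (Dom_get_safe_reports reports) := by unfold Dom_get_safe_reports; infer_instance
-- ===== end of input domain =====

-- B replaces A's try-every-deletion dampening (O(L^2) per report) by checking only the
-- two deletions at the first violating adjacent pair (O(L) per report): faster.

-- ===== PORT A =====
-- the common shape of A's four scan loops: walk the report keeping `levels`,
-- return False as soon as `levels` is nonempty and the (prev, level) pair is bad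
-- (levels[-1] on a nonempty list is getLast?; the two consecutive `return False`
-- tests of the diff loops are the disjunction in their `bad`)
def pvScan (bad : Int → Int → Bool) (levels : List Int) : List Int → Bool
  | [] => true
  | l :: rest =>
    if levels.isEmpty = false ∧ bad ((levels.getLast?).getD 0) l = true then false
    else pvScan bad (levels ++ [l]) rest

def pv_is_increasing (report : List Int) : Bool :=
  pvScan (fun prev level => decide (level ≤ prev)) [] report

def pv_is_safe_increasing (report : List Int) : Bool :=
  if pv_is_increasing report = false then false
  else pvScan (fun prev level => decide (level - prev < 1) || decide (level - prev > 3)) [] report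

def pv_is_decreasing (report : List Int) : Bool :=
  pvScan (fun prev level => decide (level ≥ prev)) [] report

def pv_is_safe_decreasing (report : List Int) : Bool :=
  if pv_is_decreasing report = false then false
  else pvScan (fun prev level => decide (prev - level < 1) || decide (prev - level > 3)) [] report

def pv_safe_increasing_dampened (report : List Int) : Bool :=
  (PySem.List.pyRange 0 report.length 1).any (fun i =>
    pv_is_safe_increasing (PySem.List.slice report none (some i) ++ PySem.List.slice report (some (i + 1)) none))

def pv_safe_decreasing_dampened (report : List Int) : Bool :=
  (PySem.List.pyRange 0 report.length 1).any (fun i =>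
    pv_is_safe_decreasing (PySem.List.slice report none (some i) ++ PySem.List.slice report (some (i + 1)) none))

def get_safe_reports (reports : List (List Int)) : List (List Int) :=
  let p := reports.foldl (fun (acc : List (List Int) × List (List Int)) report =>
    let inc := if pv_is_safe_increasing report then acc.1 ++ [report]
               else if pv_safe_increasing_dampened report then acc.1 ++ [report]
               else acc.1
    let dec := if pv_is_safe_decreasing report then acc.2 ++ [report]
               else if pv_safe_decreasing_dampened report then acc.2 ++ [report]
               else acc.2
    (inc, dec)) ([], [])
  p.1 ++ p.2

-- ===== PORT B =====
def pvOkInc (a b : Int) : Bool := decide (1 ≤ b - a) && decide (b - a ≤ 3)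

def pvOkDec (a b : Int) : Bool := decide (1 ≤ a - b) && decide (a - b ≤ 3)

-- all(ok(a, b) for a, b in zip(seq, seq[1:]))
def pvChainSafe (ok : Int → Int → Bool) (seq : List Int) : Bool :=
  (seq.zip seq.tail).all (fun p => ok p.1 p.2)

-- the first-violation search of Source B's loop-with-break
def pvFirstBad (ok : Int → Int → Bool) (r : List Int) : Option Nat :=
  (List.range (r.length - 1)).find? (fun i => !(ok (r.getD i 0) (r.getD (i + 1) 0)))

def pvDampSafe (ok : Int → Int → Bool) (r : List Int) : Bool :=
  match pvFirstBad ok r with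
  | none => true
  | some k =>
      pvChainSafe ok (r.take k ++ r.drop (k + 1)) ||
      pvChainSafe ok (r.take (k + 1) ++ r.drop (k + 2))

def get_safe_reports_alt (reports : List (List Int)) : List (List Int) :=
  reports.filter (fun r => pvDampSafe pvOkInc r) ++ reports.filter (fun r => pvDampSafe pvOkDec r)

-- ===== PRECONDITION & SPEC =====
def Spec_get_safe_reports (reports : List (List Int)) (out : List (List Int)) : Prop := out = get_safe_reports_alt reports
instance (reports : List (List Int)) (out : List (List Int)) : Decidable (Spec_get_safe_reports reports out) := by unfold Spec_get_safe_reports; infer_instance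

-- ===== CLAIM (what is proved, stated in full; the proofs are below) =====
def Claim_equal_get_safe_reports : Prop := ∀ (reports : List (List Int)), Dom_get_safe_reports reports → Spec_get_safe_reports reports (get_safe_reports reports)

-- ===== LEMMAS AND PROOFS =====

-- proof-side view of "every adjacent pair satisfies f"
def chainB (f : Int → Int → Bool) : List Int → Bool
  | [] => true
  | [_] => true
  | a :: b :: t => f a b && chainB f (b :: t)

theorem chainB_iff (f : Int → Int → Bool) (l : List Int) :
    chainB f l = true ↔ ∀ i (h : i + 1 < l.length), f l[i] l[i+1] = true := by
  induction l with
  | nil => simp [chainB]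
  | cons a t ih =>
    cases t with
    | nil => simp [chainB]
    | cons b t' =>
      simp only [chainB, Bool.and_eq_true]
      constructor
      · rintro ⟨hab, hc⟩ i hi
        cases i with
        | zero => simpa using hab
        | succ j =>
          have := (ih.mp hc) j (by simpa using hi)
          simpa using this
      · intro h
        refine ⟨h 0 (by simp), ih.mpr ?_⟩
        intro j hj
        have := h (j + 1) (by simpa using hj)
        simpa using this

theorem pvScan_last (bad : Int → Int → Bool) :
    ∀ (rest levels : List Int) (p : Int), levels.getLast? = some p →
      pvScan bad levels rest = chainB (fun a b => !bad a b) (p :: rest) := by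
  intro rest
  induction rest with
  | nil => intro levels p _; simp [pvScan, chainB]
  | cons l rest ih =>
    intro levels p hlast
    have hne : levels.isEmpty = false := by
      cases levels with
      | nil => simp at hlast
      | cons x xs => rfl
    rw [pvScan, hlast]
    by_cases hb : bad p l = true
    · rw [if_pos ⟨hne, by simpa using hb⟩]
      simp [chainB, hb]
    · rw [if_neg (by simp [hb])]
      rw [ih (levels ++ [l]) l List.getLast?_concat]
      simp [chainB, hb]

theorem pvScan_nil (bad : Int → Int → Bool) (r : List Int) :
    pvScan bad [] r = chainB (fun a b => !bad a b) r := by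
  cases r with
  | nil => simp [pvScan, chainB]
  | cons a t =>
    rw [pvScan, if_neg (by simp)]
    exact pvScan_last bad t [a] a rfl

theorem chainB_and (f g : Int → Int → Bool) (l : List Int) :
    (chainB f l && chainB g l) = chainB (fun a b => f a b && g a b) l := by
  induction l with
  | nil => simp [chainB]
  | cons a t ih =>
    cases t with
    | nil => simp [chainB]
    | cons b t' =>
      simp only [chainB]
      cases hf : f a b <;> cases hg : g a b <;>
        simp [← ih]

theorem chainB_congr (f g : Int → Int → Bool) (h : ∀ a b, f a b = g a b) (l : List Int) :
    chainB f l = chainB g l := by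
  induction l with
  | nil => rfl
  | cons a t ih =>
    cases t with
    | nil => rfl
    | cons b t' => simp only [chainB, h a b, ih]

theorem safe_inc_eq (r : List Int) : pv_is_safe_increasing r = chainB pvOkInc r := by
  rw [pv_is_safe_increasing, pv_is_increasing]
  rw [pvScan_nil, pvScan_nil]
  have h1 : ∀ x : Bool, ∀ y : Bool, (if x = false then false else y) = (x && y) := by decide
  rw [h1, chainB_and]
  refine chainB_congr _ _ (fun a b => ?_) r
  rw [Bool.eq_iff_iff]
  simp [pvOkInc]
  omega

theorem safe_dec_eq (r : List Int) : pv_is_safe_decreasing r = chainB pvOkDec r := by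
  rw [pv_is_safe_decreasing, pv_is_decreasing]
  rw [pvScan_nil, pvScan_nil]
  have h1 : ∀ x : Bool, ∀ y : Bool, (if x = false then false else y) = (x && y) := by decide
  rw [h1, chainB_and]
  refine chainB_congr _ _ (fun a b => ?_) r
  rw [Bool.eq_iff_iff]
  simp [pvOkDec]
  omega

theorem chainSafe_eq (ok : Int → Int → Bool) (l : List Int) : pvChainSafe ok l = chainB ok l := by
  induction l with
  | nil => rfl
  | cons a t ih =>
    cases t with
    | nil => rfl
    | cons b t' =>
      simp only [pvChainSafe, List.tail_cons, List.zip_cons_cons, List.all_cons, chainB]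
      rw [← ih]
      rfl

theorem firstBad_none_iff (ok : Int → Int → Bool) (r : List Int) :
    pvFirstBad ok r = none ↔ chainB ok r = true := by
  rw [pvFirstBad, List.find?_eq_none, chainB_iff]
  constructor
  · intro h i hi
    have := h i (List.mem_range.mpr (by omega))
    rw [List.getD_eq_getElem r 0 (by omega), List.getD_eq_getElem r 0 hi] at this
    simpa using this
  · intro h i hi
    have hi' : i + 1 < r.length := by
      have := List.mem_range.mp hi; omega
    rw [List.getD_eq_getElem r 0 (by omega), List.getD_eq_getElem r 0 hi']
    simp [h i hi']

theorem firstBad_some (ok : Int → Int → Bool) (r : List Int) (k : Nat)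
    (h : pvFirstBad ok r = some k) :
    k + 1 < r.length ∧ ok (r.getD k 0) (r.getD (k + 1) 0) = false := by
  have hmem := List.mem_of_find?_eq_some h
  have hk : k < r.length - 1 := List.mem_range.mp hmem
  have hp := List.find?_some h
  refine ⟨by omega, by simpa using hp⟩

-- deleting an index away from a bad pair leaves the bad pair adjacent
theorem nofix (ok : Int → Int → Bool) (r : List Int) (k j : Nat)
    (hk : k + 1 < r.length) (hbad : ok (r.getD k 0) (r.getD (k + 1) 0) = false)
    (hj : j < r.length) (h1 : j ≠ k) (h2 : j ≠ k + 1) :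
    chainB ok (r.take j ++ r.drop (j + 1)) = false := by
  rw [← List.eraseIdx_eq_take_drop_succ]
  rw [List.getD_eq_getElem r 0 (by omega), List.getD_eq_getElem r 0 hk] at hbad
  by_contra hcon
  rw [Bool.not_eq_false, chainB_iff] at hcon
  have hlen : (r.eraseIdx j).length = r.length - 1 := by
    simp [List.length_eraseIdx, hj]
  rcases (by omega : j < k ∨ k + 1 < j) with hlt | hgt
  · have hb : (k - 1) + 1 < (r.eraseIdx j).length := by omega
    have := hcon (k - 1) hb
    rw [List.getElem_eraseIdx, List.getElem_eraseIdx] at this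
    rw [dif_neg (by omega), dif_neg (by omega)] at this
    simp only [show k - 1 + 1 = k from by omega] at this
    rw [this] at hbad
    exact absurd hbad (by simp)
  · have hb : k + 1 < (r.eraseIdx j).length := by omega
    have := hcon k hb
    rw [List.getElem_eraseIdx, List.getElem_eraseIdx] at this
    rw [dif_pos (by omega), dif_pos (by omega)] at this
    rw [this] at hbad
    exact absurd hbad (by simp)

-- the per-report "safe or dampened-safe" test of A equals B's dampened check
theorem damp_eq (ok : Int → Int → Bool) (asafe : List Int → Bool)
    (hA : ∀ s, asafe s = chainB ok s) (r : List Int) :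
    (asafe r ||
      (PySem.List.pyRange 0 r.length 1).any (fun i =>
        asafe (PySem.List.slice r none (some i) ++ PySem.List.slice r (some (i + 1)) none)))
      = pvDampSafe ok r := by
  cases hfb : pvFirstBad ok r with
  | none =>
    have hc := (firstBad_none_iff ok r).mp hfb
    simp [pvDampSafe, hfb, hA, hc]
  | some k =>
    obtain ⟨hk, hbad⟩ := firstBad_some ok r k hfb
    have hcf : chainB ok r = false := by
      by_contra hh
      rw [Bool.not_eq_false] at hh
      have := (chainB_iff ok r).mp hh k hk
      rw [List.getD_eq_getElem r 0 (by omega), List.getD_eq_getElem r 0 hk] at hbad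
      rw [this] at hbad
      exact absurd hbad (by simp)
    rw [pvDampSafe, hfb, hA, hcf, Bool.false_or]
    rw [Bool.eq_iff_iff, List.any_eq_true]
    simp only [chainSafe_eq, Bool.or_eq_true]
    constructor
    · rintro ⟨i, hi, hsafe⟩
      obtain ⟨h0, hlt⟩ := PySem.List.mem_pyRange_one.mp hi
      obtain ⟨j, rfl⟩ : ∃ jn : Nat, i = (jn : Int) := ⟨i.toNat, (Int.toNat_of_nonneg h0).symm⟩
      have hjlen : j < r.length := by exact_mod_cast hlt
      rw [hA, PySem.List.slice_to_natCast,
        show ((j : Int) + 1) = ((j + 1 : Nat) : Int) from by push_cast; ring,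
        PySem.List.slice_from_natCast] at hsafe
      by_cases hjk : j = k
      · subst hjk; exact Or.inl hsafe
      · by_cases hjk1 : j = k + 1
        · subst hjk1; exact Or.inr hsafe
        · rw [nofix ok r k j hk hbad hjlen hjk hjk1] at hsafe
          exact absurd hsafe (by simp)
    · intro h
      rcases h with hs | hs
      · refine ⟨(k : Int), PySem.List.mem_pyRange_one.mpr ⟨by omega, by exact_mod_cast (by omega : k < r.length)⟩, ?_⟩
        rw [hA, PySem.List.slice_to_natCast,
          show ((k : Int) + 1) = ((k + 1 : Nat) : Int) from by push_cast; ring,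
          PySem.List.slice_from_natCast]
        exact hs
      · refine ⟨((k + 1 : Nat) : Int), PySem.List.mem_pyRange_one.mpr ⟨by omega, by exact_mod_cast hk⟩, ?_⟩
        rw [hA, PySem.List.slice_to_natCast,
          show (((k + 1 : Nat) : Int) + 1) = ((k + 2 : Nat) : Int) from by push_cast; ring,
          PySem.List.slice_from_natCast]
        exact hs

theorem inc_pred_eq (rep : List Int) :
    (pv_is_safe_increasing rep || pv_safe_increasing_dampened rep) = pvDampSafe pvOkInc rep := by
  rw [pv_safe_increasing_dampened]
  exact damp_eq pvOkInc pv_is_safe_increasing safe_inc_eq rep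

theorem dec_pred_eq (rep : List Int) :
    (pv_is_safe_decreasing rep || pv_safe_decreasing_dampened rep) = pvDampSafe pvOkDec rep := by
  rw [pv_safe_decreasing_dampened]
  exact damp_eq pvOkDec pv_is_safe_decreasing safe_dec_eq rep

theorem fold_pair :
    ∀ (reports : List (List Int)) (a1 a2 : List (List Int)),
      reports.foldl (fun (acc : List (List Int) × List (List Int)) report =>
        let inc := if pv_is_safe_increasing report then acc.1 ++ [report]
                   else if pv_safe_increasing_dampened report then acc.1 ++ [report]
                   else acc.1
        let dec := if pv_is_safe_decreasing report then acc.2 ++ [report]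
                   else if pv_safe_decreasing_dampened report then acc.2 ++ [report]
                   else acc.2
        (inc, dec)) (a1, a2)
      = (a1 ++ reports.filter (fun r => pvDampSafe pvOkInc r),
         a2 ++ reports.filter (fun r => pvDampSafe pvOkDec r)) := by
  intro reports
  induction reports with
  | nil => intro a1 a2; simp
  | cons rep rest ih =>
    intro a1 a2
    rw [List.foldl_cons, List.filter_cons, List.filter_cons, ih]
    have hi := inc_pred_eq rep
    have hd := dec_pred_eq rep
    cases h1 : pv_is_safe_increasing rep <;> cases h2 : pv_safe_increasing_dampened rep <;>
      cases h3 : pv_is_safe_decreasing rep <;> cases h4 : pv_safe_decreasing_dampened rep <;>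
        rw [h1, h2] at hi <;> rw [h3, h4] at hd <;>
          simp [← hi, ← hd, List.append_assoc]

-- ===== VERDICT (by name: the statement is the Claim_ definition above) =====
theorem get_safe_reports_spec : Claim_equal_get_safe_reports := by
  intro reports _
  show get_safe_reports reports = get_safe_reports_alt reports
  rw [get_safe_reports, get_safe_reports_alt]
  rw [fold_pair reports [] []]
  simp
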